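-- pv_equiv track=rewrite | github.com/janjilecek/DP_files | Framework/Framework.py | get_filered
-- ===== SOURCE A (Python) =====
-- def get_filered(second, _min, _max, electrodeStart):
--     ixt = [0, 250, 500, 750, 1000, 1250]
--     ixs = [250, 500, 750, 1000, 1250, 1500]
--     res = []
--
--     for i, val in enumerate(ixt):
--         if _min <= i <= _max:
--             res.extend(second[ixt[i] + electrodeStart:ixs[i] + electrodeStart])
--     return res
-- ===== SOURCE B (Python) =====
-- def get_filered(second, _min, _max, electrodeStart):
--     # The six windows are consecutive 250-wide slices, so the selected ones
--     # form one contiguous block: clamp the bucket range and take one slice.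
--     lo = max(_min, 0)
--     hi = min(_max, 5)
--     if lo > hi:
--         return []
--     return second[250 * lo + electrodeStart : 250 * (hi + 1) + electrodeStart]
-- ===== Notes on version B (the rewrite author's own statement) =====
-- stated objective: simpler
-- what changed: Replaced the loop over two hard-coded offset tables with one closed-form slice over the clamped bucket range lo=max(_min,0)..hi=min(_max,5); Pre_ excludes inputs whose selected slice bounds straddle zero, where Python's negative-index wraparound makes A's per-bucket concatenation and B's single slice two accidental readings of an out-of-range negative offset that can disagree on lists longer than 250 elements.
-- outside the precondition, e.g. on get_filered([1, 2, 3], 0, 5, -100): A returns [1, 2, 3], B returns [1, 2, 3]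
import Mathlib
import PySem

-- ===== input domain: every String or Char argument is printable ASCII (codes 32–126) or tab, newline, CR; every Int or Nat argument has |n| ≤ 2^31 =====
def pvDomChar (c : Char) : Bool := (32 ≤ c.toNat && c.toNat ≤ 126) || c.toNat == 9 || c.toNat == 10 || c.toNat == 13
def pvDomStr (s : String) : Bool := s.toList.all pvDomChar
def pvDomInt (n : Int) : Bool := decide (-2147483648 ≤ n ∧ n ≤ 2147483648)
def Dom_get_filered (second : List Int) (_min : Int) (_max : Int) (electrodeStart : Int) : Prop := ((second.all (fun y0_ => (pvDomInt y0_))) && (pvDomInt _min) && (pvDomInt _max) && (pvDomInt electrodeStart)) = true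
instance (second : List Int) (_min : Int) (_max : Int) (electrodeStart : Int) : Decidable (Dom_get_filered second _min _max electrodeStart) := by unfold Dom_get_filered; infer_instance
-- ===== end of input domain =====

-- B replaces the table-driven loop (enumerate over two offset tables, conditional extend)
-- by one closed-form slice over the clamped bucket range; objective: simpler.


-- ===== PORT A =====
def get_filered (second : List Int) (_min : Int) (_max : Int) (electrodeStart : Int) : List Int :=
  let ixt : List Int := [0, 250, 500, 750, 1000, 1250]
  let ixs : List Int := [250, 500, 750, 1000, 1250, 1500]
  (PySem.List.enumerate ixt).foldl (fun res iv =>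
    if _min ≤ iv.1 ∧ iv.1 ≤ _max then
      res ++ PySem.List.slice second
        (some ((PySem.List.pyGet? ixt iv.1).getD 0 + electrodeStart))
        (some ((PySem.List.pyGet? ixs iv.1).getD 0 + electrodeStart))
    else res) []

-- ===== PORT B =====
def get_filered_alt (second : List Int) (_min : Int) (_max : Int) (electrodeStart : Int) : List Int :=
  let lo : Int := max _min 0
  let hi : Int := min _max 5
  if hi < lo then []
  else PySem.List.slice second (some (250 * lo + electrodeStart)) (some (250 * (hi + 1) + electrodeStart))

-- ===== PRECONDITION & SPEC =====
-- Pre_ excludes inputs whose selected slice bounds straddle zero: there Python's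
-- negative-index wraparound makes A's per-bucket concatenation and B's single slice two
-- accidental readings of an out-of-range negative offset that can disagree (on lists
-- longer than 250 elements).
def Pre_get_filered (second : List Int) (_min : Int) (_max : Int) (electrodeStart : Int) : Prop :=
  min _max 5 < max _min 0 ∨ 0 ≤ 250 * max _min 0 + electrodeStart ∨
    250 * (min _max 5 + 1) + electrodeStart < 0
instance (second : List Int) (_min : Int) (_max : Int) (electrodeStart : Int) : Decidable (Pre_get_filered second _min _max electrodeStart) := by unfold Pre_get_filered; infer_instance
def pvWitness_get_filered : List Int × Int × Int × Int := ([3, 1, 4, 1, 5], 0, 5, 0)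

def Spec_get_filered (second : List Int) (_min : Int) (_max : Int) (electrodeStart : Int) (out : List Int) : Prop := out = get_filered_alt second _min _max electrodeStart
instance (second : List Int) (_min : Int) (_max : Int) (electrodeStart : Int) (out : List Int) : Decidable (Spec_get_filered second _min _max electrodeStart out) := by unfold Spec_get_filered; infer_instance

-- ===== CLAIM (what is proved, stated in full; the proofs are below) =====
def Claim_equal_get_filered : Prop := ∀ (second : List Int) (_min : Int) (_max : Int) (electrodeStart : Int), Dom_get_filered second _min _max electrodeStart → Pre_get_filered second _min _max electrodeStart → Spec_get_filered second _min _max electrodeStart (get_filered second _min _max electrodeStart)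

-- ===== LEMMAS AND PROOFS =====

-- clampIdx is monotone when both bounds are nonneg, both negative, or they are ≥ length apart.
lemma clamp_mono (n : ℕ) (a b : Int) (hab : a ≤ b)
    (h : 0 ≤ a ∨ b < 0 ∨ (n : Int) ≤ b - a) :
    PySem.List.clampIdx n a ≤ PySem.List.clampIdx n b := by
  unfold PySem.List.clampIdx; split_ifs <;> omega

-- Adjacent slices with monotone effective bounds concatenate to one slice.
lemma slice_append (xs : List Int) (a b c : Int)
    (h1 : PySem.List.clampIdx xs.length a ≤ PySem.List.clampIdx xs.length b)
    (h2 : PySem.List.clampIdx xs.length b ≤ PySem.List.clampIdx xs.length c) :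
    PySem.List.slice xs (some a) (some b) ++ PySem.List.slice xs (some b) (some c)
      = PySem.List.slice xs (some a) (some c) := by
  simp only [PySem.List.slice]
  set ca := PySem.List.clampIdx xs.length a
  set cb := PySem.List.clampIdx xs.length b
  set cc := PySem.List.clampIdx xs.length c
  have hd : xs.drop cb = (xs.drop ca).drop (cb - ca) := by
    rw [List.drop_drop]; congr 1; omega
  rw [hd, show cc - ca = (cb - ca) + (cc - cb) by omega, List.take_add]

-- Concatenating the k+1 consecutive 250-wide slices from bucket lo equals one slice,
-- provided all bounds are nonneg, all negative, or the list is at most 250 long.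
lemma chain (xs : List Int) (e lo : Int) : ∀ k : ℕ,
    (0 ≤ 250 * lo + e ∨ 250 * lo + 250 * k + 250 + e < 0 ∨ (xs.length : Int) ≤ 250) →
    (PySem.List.pyRange lo (lo + k + 1) 1).flatMap
        (fun i => PySem.List.slice xs (some (250 * i + e)) (some (250 * i + 250 + e)))
      = PySem.List.slice xs (some (250 * lo + e)) (some (250 * lo + 250 * k + 250 + e)) := by
  intro k
  induction k with
  | zero =>
    intro _
    simp only [Nat.cast_zero]
    rw [PySem.List.pyRange_one_cons (by omega : lo < lo + 0 + 1),
        PySem.List.pyRange_one_eq_nil (by omega : lo + 0 + 1 ≤ lo + 1)]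
    simp only [List.flatMap_cons, List.flatMap_nil, List.append_nil]
    congr 2; push_cast; ring
  | succ k ih =>
    intro h
    rw [PySem.List.pyRange_one_append lo (lo + k + 1) (lo + (k + 1 : ℕ) + 1)
          (by omega) (by push_cast; omega),
        List.flatMap_append,
        ih (by rcases h with h | h | h
               · exact Or.inl h
               · refine Or.inr (Or.inl ?_); push_cast at h ⊢; omega
               · exact Or.inr (Or.inr h)),
        PySem.List.pyRange_one_cons (by omega : lo + k + 1 < lo + (k + 1 : ℕ) + 1),
        PySem.List.pyRange_one_eq_nil (by push_cast; omega : lo + (k + 1 : ℕ) + 1 ≤ lo + k + 1 + 1)]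
    simp only [List.flatMap_cons, List.flatMap_nil, List.append_nil]
    have hb1 : (250 : Int) * (lo + k + 1) + e = 250 * lo + 250 * k + 250 + e := by ring
    have hb2 : (250 : Int) * (lo + k + 1) + 250 + e = 250 * lo + 250 * (k + 1 : ℕ) + 250 + e := by
      push_cast; ring
    rw [hb1, hb2]
    refine slice_append xs _ _ _ ?_ ?_
    · refine clamp_mono _ _ _ (by omega) ?_
      rcases h with h | h | h
      · exact Or.inl h
      · refine Or.inr (Or.inl ?_); push_cast at h ⊢; omega
      · refine Or.inr (Or.inr ?_); omega
    · refine clamp_mono _ _ _ (by omega) ?_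
      rcases h with h | h | h
      · refine Or.inl ?_; omega
      · refine Or.inr (Or.inl ?_); push_cast at h ⊢; omega
      · refine Or.inr (Or.inr ?_); push_cast; omega

-- Iterating over the clamped range lo..u-1 equals iterating over 0..N-1 with the range test inside.
lemma flatMap_pyRange_clip (f : Int → List Int) (lo u N : Int) (h0 : 0 ≤ lo) (hN : u ≤ N) :
    (PySem.List.pyRange lo u 1).flatMap f
      = (PySem.List.pyRange 0 N 1).flatMap (fun i => if lo ≤ i ∧ i < u then f i else []) := by
  by_cases h : lo ≤ u
  · rw [PySem.List.pyRange_one_append 0 lo N h0 (le_trans h hN),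
        PySem.List.pyRange_one_append lo u N h hN,
        List.flatMap_append, List.flatMap_append]
    have hA : ∀ i ∈ PySem.List.pyRange 0 lo 1, (if lo ≤ i ∧ i < u then f i else []) = ([] : List Int) := by
      intro i hi; rw [PySem.List.mem_pyRange_one] at hi; rw [if_neg]; omega
    have hB : ∀ i ∈ PySem.List.pyRange lo u 1, (if lo ≤ i ∧ i < u then f i else []) = f i := by
      intro i hi; rw [PySem.List.mem_pyRange_one] at hi; rw [if_pos]; omega
    have hC : ∀ i ∈ PySem.List.pyRange u N 1, (if lo ≤ i ∧ i < u then f i else []) = ([] : List Int) := by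
      intro i hi; rw [PySem.List.mem_pyRange_one] at hi; rw [if_neg]; omega
    have e1 : (PySem.List.pyRange 0 lo 1).flatMap (fun _ : Int => ([] : List Int)) = [] := by
      simp [List.flatMap_eq_nil_iff]
    have e2 : (PySem.List.pyRange u N 1).flatMap (fun _ : Int => ([] : List Int)) = [] := by
      simp [List.flatMap_eq_nil_iff]
    rw [List.flatMap_congr hA, List.flatMap_congr hB, List.flatMap_congr hC, e1, e2,
        List.nil_append, List.append_nil]
  · rw [PySem.List.pyRange_one_eq_nil (by omega)]
    have hA : ∀ i ∈ PySem.List.pyRange 0 N 1, (if lo ≤ i ∧ i < u then f i else []) = ([] : List Int) := by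
      intro i hi; rw [if_neg]; omega
    have e1 : (PySem.List.pyRange 0 N 1).flatMap (fun _ : Int => ([] : List Int)) = [] := by
      simp [List.flatMap_eq_nil_iff]
    rw [List.flatMap_congr hA, e1]
    simp

-- Normal form of A: one if-guarded slice per bucket 0..5.
def bucketForm (second : List Int) (_min _max electrodeStart : Int) : List Int :=
  ([0, 1, 2, 3, 4, 5] : List Int).flatMap (fun i =>
    if _min ≤ i ∧ i ≤ _max then
      PySem.List.slice second (some (250 * i + electrodeStart)) (some (250 * i + 250 + electrodeStart))
    else [])

lemma A_eq_bucketForm (second : List Int) (_min _max e : Int) :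
    get_filered second _min _max e = bucketForm second _min _max e := by
  simp only [get_filered, bucketForm, PySem.List.enumerate]
  norm_num [PySem.List.pyGet?, PySem.List.pyIdx?, List.flatMap]
  split_ifs <;> simp

-- ===== VERDICT (by name: the statement is the Claim_ definition above) =====
theorem get_filered_spec : Claim_equal_get_filered := by
  intro second _min _max e _ hpre
  unfold Spec_get_filered
  rw [A_eq_bucketForm]
  unfold get_filered_alt
  set lo : Int := max _min 0 with hlo
  set hi : Int := min _max 5 with hhi
  by_cases hlh : hi < lo
  · rw [if_pos hlh]
    unfold bucketForm
    simp only [List.flatMap_cons, List.flatMap_nil]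
    rw [if_neg (by omega), if_neg (by omega), if_neg (by omega), if_neg (by omega),
        if_neg (by omega), if_neg (by omega)]
    simp
  · rw [if_neg hlh]
    have hc : 0 ≤ 250 * lo + e ∨ 250 * lo + 250 * ((hi - lo).toNat : ℕ) + 250 + e < 0 ∨
        ((second.length : ℕ) : Int) ≤ 250 := by
      rcases hpre with h | h | h
      · omega
      · exact Or.inl h
      · refine Or.inr (Or.inl ?_); omega
    have hch := chain second e lo ((hi - lo).toNat) hc
    have hr1 : lo + ((hi - lo).toNat : Int) + 1 = hi + 1 := by omega
    have hr2 : (250 : Int) * lo + 250 * ((hi - lo).toNat : Int) + 250 + e = 250 * (hi + 1) + e := by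
      omega
    rw [hr1, hr2] at hch
    rw [← hch, flatMap_pyRange_clip _ lo (hi + 1) 6 (by omega) (by omega)]
    have h6 : PySem.List.pyRange 0 6 1 = [0, 1, 2, 3, 4, 5] := by decide
    rw [h6]
    unfold bucketForm
    apply List.flatMap_congr
    intro i hi'
    have hib : (0 : Int) ≤ i ∧ i ≤ 5 := by
      simp only [List.mem_cons, List.not_mem_nil, or_false] at hi'
      rcases hi' with h | h | h | h | h | h <;> subst h <;> omega
    exact if_congr (by omega) rfl rfl
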